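-- pv_equiv track=rewrite | github.com/aconeeny9/337Project1 | util.py | new_search_backward
-- ===== SOURCE A (Python) =====
-- def new_search_backward(data, starting_index, inclusive = False):
--     if starting_index == 0:
--         return []
--     fragments = []
--     for index in range(1, starting_index+1):
--         if inclusive:
--             fragments.append(" ".join(data[starting_index - index:starting_index+1]))
--         else:
--             fragments.append(" ".join(data[starting_index - index:starting_index]))
--     return fragments
-- ===== SOURCE B (Python) =====
-- def new_search_backward(data, starting_index, inclusive=False):
--     # One backward sweep maintaining a running joined string instead of
--     # re-slicing and re-joining a growing window at every step.
--     if starting_index <= 0: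
--         return []
--     if inclusive:
--         running, empty = data[starting_index], False
--     else:
--         running, empty = "", True
--     result = []
--     for index in range(1, starting_index + 1):
--         element = data[starting_index - index]
--         running = element if empty else element + " " + running
--         empty = False
--         result.append(running)
--     return result
-- ===== Notes on version B (the rewrite author's own statement) =====
-- stated objective: alternative
-- what changed: Replaces A's per-index re-slice-and-re-join (a fresh slice and ' '.join for every window length) with a single backward sweep that extends one running joined string by one element per step (no re-slicing and no repeated joining of already-joined elements); Pre_ excludes starting_index past the end of data, where A's slices silently clamp while the natural indexing B raises IndexError.
-- outside the precondition, e.g. on new_search_backward(['a'], 2, False): A returns ['', 'a'], B raises IndexError; on new_search_backward(['a'], 1, True): A returns ['a'], B raises IndexError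
import Mathlib
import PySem

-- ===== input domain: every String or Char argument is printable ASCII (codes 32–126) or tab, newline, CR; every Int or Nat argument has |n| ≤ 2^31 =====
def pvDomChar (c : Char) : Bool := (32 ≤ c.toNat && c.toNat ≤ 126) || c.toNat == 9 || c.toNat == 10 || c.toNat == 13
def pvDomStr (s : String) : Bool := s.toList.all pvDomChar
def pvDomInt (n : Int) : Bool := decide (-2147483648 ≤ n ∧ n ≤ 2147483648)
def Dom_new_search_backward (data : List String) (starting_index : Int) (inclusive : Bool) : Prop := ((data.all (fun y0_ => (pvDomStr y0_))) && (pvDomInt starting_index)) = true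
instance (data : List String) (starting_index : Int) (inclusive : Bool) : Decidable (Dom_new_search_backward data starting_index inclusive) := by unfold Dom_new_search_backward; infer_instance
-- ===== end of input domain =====

-- B replaces A's per-index re-slice-and-re-join with one backward sweep that extends a
-- running joined string incrementally (objective: alternative decomposition, same result on Pre_).

-- ===== PORT A =====
def new_search_backward (data : List String) (starting_index : Int) (inclusive : Bool) : List String :=
  if starting_index = 0 then []
  else
    (PySem.List.pyRange 1 (starting_index + 1) 1).foldl
      (fun fragments index =>
        if inclusive then
          fragments ++ [PySem.Str.join " " (PySem.List.slice data (some (starting_index - index)) (some (starting_index + 1)))]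
        else
          fragments ++ [PySem.Str.join " " (PySem.List.slice data (some (starting_index - index)) (some starting_index))])
      []

-- ===== PORT B =====
-- data[i] with i in range (guaranteed by Pre_) is ported as pyGetD with default "".
def new_search_backward_alt (data : List String) (starting_index : Int) (inclusive : Bool) : List String :=
  if starting_index ≤ 0 then []
  else
    let init : String × Bool :=
      if inclusive then (PySem.List.pyGetD data starting_index "", false) else ("", true)
    let st :=
      (PySem.List.pyRange 1 (starting_index + 1) 1).foldl
        (fun (st : String × Bool × List String) index =>
          let element := PySem.List.pyGetD data (starting_index - index) ""
          let running := if st.2.1 then element else element ++ " " ++ st.1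
          (running, false, st.2.2 ++ [running]))
        (init.1, init.2, [])
    st.2.2

-- ===== PRECONDITION & SPEC =====
-- Pre_ excludes starting_index past the end of data (≥ length for inclusive, > length otherwise),
-- where A's slices silently clamp while B's natural element indexing raises IndexError.
def Pre_new_search_backward (data : List String) (starting_index : Int) (inclusive : Bool) : Prop :=
  starting_index ≤ 0 ∨
    (if inclusive then starting_index < (data.length : Int) else starting_index ≤ (data.length : Int))
instance (data : List String) (starting_index : Int) (inclusive : Bool) : Decidable (Pre_new_search_backward data starting_index inclusive) := by unfold Pre_new_search_backward; infer_instance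

def pvWitness_new_search_backward : List String × Int × Bool := (["alpha", "b c", "d"], 2, true)

def Spec_new_search_backward (data : List String) (starting_index : Int) (inclusive : Bool) (out : List String) : Prop := out = new_search_backward_alt data starting_index inclusive
instance (data : List String) (starting_index : Int) (inclusive : Bool) (out : List String) : Decidable (Spec_new_search_backward data starting_index inclusive out) := by unfold Spec_new_search_backward; infer_instance

-- ===== CLAIM (what is proved, stated in full; the proofs are below) =====
def Claim_equal_new_search_backward : Prop := ∀ (data : List String) (starting_index : Int) (inclusive : Bool), Dom_new_search_backward data starting_index inclusive → Pre_new_search_backward data starting_index inclusive → Spec_new_search_backward data starting_index inclusive (new_search_backward data starting_index inclusive)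

-- ===== LEMMAS AND PROOFS =====

-- joined value of the window slice data[si-k : hi]
def pvS (data : List String) (si hi : Int) (k : Nat) : List String :=
  PySem.List.slice data (some (si - k)) (some hi)

theorem pv_join_cons (e : String) (rest : List String) :
    PySem.Str.join " " (e :: rest) =
      if rest.isEmpty then e else e ++ " " ++ PySem.Str.join " " rest := by
  cases rest with
  | nil =>
      simp only [List.isEmpty_nil, if_pos]
      rw [← String.toList_inj]
      simp [PySem.Str.toList_join, PySem.Chars.join_singleton]
  | cons q rest =>
      simp only [List.isEmpty_cons, if_neg, Bool.false_eq_true, not_false_eq_true]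
      rw [← String.toList_inj]
      simp [PySem.Str.toList_join, PySem.Chars.join_cons_cons]

theorem pv_slice_cons (data : List String) (pos hi : Int) (h0 : 0 ≤ pos) (hlt : pos < hi)
    (hlen : pos < (data.length : Int)) :
    PySem.List.slice data (some pos) (some hi) =
      data[pos.toNat]'(by omega) :: PySem.List.slice data (some (pos + 1)) (some hi) := by
  rw [PySem.List.slice_toNat data h0 (by omega), PySem.List.slice_toNat data (by omega) (by omega)]
  rw [List.drop_eq_getElem_cons (show pos.toNat < data.length by omega)]
  have h1 : (pos + 1).toNat = pos.toNat + 1 := by omega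
  have h2 : hi.toNat - pos.toNat = (hi.toNat - (pos.toNat + 1)) + 1 := by omega
  rw [h1, h2, List.take_succ_cons]

theorem pv_join_nil : PySem.Str.join " " ([] : List String) = "" := by
  rw [← String.toList_inj]
  simp [PySem.Str.toList_join, PySem.Chars.join_nil]

theorem pv_slice_self (data : List String) (a : Int) (h0 : 0 ≤ a) :
    PySem.List.slice data (some a) (some a) = [] := by
  rw [PySem.List.slice_toNat data h0 h0]
  simp

theorem pv_join_singleton (e : String) : PySem.Str.join " " [e] = e := by
  rw [pv_join_cons]; simp

-- B's loop invariant: after indices 1..k the state is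
-- (join of the current window slice, its emptiness, A's fragments so far)
theorem pv_loop_inv (data : List String) (si hi : Int) (hle : si ≤ hi)
    (hlen : si ≤ (data.length : Int)) (k : Nat) (hk : (k : Int) ≤ si) :
    (PySem.List.pyRange 1 ((k : Int) + 1) 1).foldl
      (fun (st : String × Bool × List String) index =>
        let element := PySem.List.pyGetD data (si - index) ""
        let running := if st.2.1 then element else element ++ " " ++ st.1
        (running, false, st.2.2 ++ [running]))
      (PySem.Str.join " " (pvS data si hi 0), (pvS data si hi 0).isEmpty, [])
    = (PySem.Str.join " " (pvS data si hi k), (pvS data si hi k).isEmpty,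
       (PySem.List.pyRange 1 ((k : Int) + 1) 1).map
         (fun j => PySem.Str.join " " (PySem.List.slice data (some (si - j)) (some hi)))) := by
  induction k with
  | zero =>
      rw [show ((0 : Nat) : Int) + 1 = 1 by norm_num, PySem.List.pyRange_one_eq_nil le_rfl]
      simp
  | succ k ih =>
      have hk' : (k : Int) ≤ si := by push_cast at hk ⊢; omega
      have hcast : ((k + 1 : Nat) : Int) = (k : Int) + 1 := by push_cast; ring
      rw [hcast, PySem.List.pyRange_one_succ_right (by omega), List.foldl_append,
        List.map_append, ih hk']
      have hpos0 : 0 ≤ si - ((k : Int) + 1) := by push_cast at hk; omega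
      have hposlt : si - ((k : Int) + 1) < (data.length : Int) := by push_cast at hk; omega
      have hShi : pvS data si hi (k + 1) = PySem.List.slice data (some (si - ((k : Int) + 1))) (some hi) := by
        unfold pvS; rw [hcast]
      have hSk : pvS data si hi k = PySem.List.slice data (some ((si - ((k : Int) + 1)) + 1)) (some hi) := by
        unfold pvS; congr 2; omega
      simp only [List.foldl_cons, List.foldl_nil, List.map_cons, List.map_nil]
      have hcons := pv_slice_cons data (si - ((k : Int) + 1)) hi hpos0 (by omega) hposlt
      rw [← hShi, ← hSk] at hcons
      have he : PySem.List.pyGetD data (si - ((k : Int) + 1)) "" =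
          data[(si - ((k : Int) + 1)).toNat]'(by omega) :=
        PySem.List.pyGetD_eq_getElem data "" hpos0 hposlt
      have hjoin : PySem.Str.join " " (pvS data si hi (k + 1)) =
          if (pvS data si hi k).isEmpty then PySem.List.pyGetD data (si - ((k : Int) + 1)) ""
          else PySem.List.pyGetD data (si - ((k : Int) + 1)) "" ++ " " ++ PySem.Str.join " " (pvS data si hi k) := by
        rw [hcons, pv_join_cons, he]
      have hne : (pvS data si hi (k + 1)).isEmpty = false := by
        rw [hcons]; simp
      rw [← hShi, hjoin, hne]

theorem new_search_backward_spec : Claim_equal_new_search_backward := by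
  intro data si inc _ hpre
  unfold Spec_new_search_backward new_search_backward new_search_backward_alt
  by_cases h0 : si ≤ 0
  · have hnil : PySem.List.pyRange 1 (si + 1) 1 = [] := PySem.List.pyRange_one_eq_nil (by omega)
    rw [if_pos h0, hnil]
    simp only [List.foldl_nil]
    split_ifs <;> rfl
  · replace h0 : 0 < si := by omega
    rw [if_neg (by omega : ¬ si = 0), if_neg (by omega : ¬ si ≤ 0)]
    obtain ⟨n, rfl⟩ : ∃ n : Nat, si = (n : Int) := ⟨si.toNat, (Int.toNat_of_nonneg h0.le).symm⟩
    cases inc with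
    | false =>
        have hlen : (n : Int) ≤ (data.length : Int) := by
          rcases hpre with h | h
          · omega
          · simpa using h
        have hS0 : pvS data (n : Int) (n : Int) 0 = [] := by
          unfold pvS
          rw [show ((n : Int) - ((0 : Nat) : Int)) = (n : Int) by push_cast; ring]
          exact pv_slice_self data _ (by positivity)
        have hinv := pv_loop_inv data (n : Int) (n : Int) le_rfl hlen n le_rfl
        rw [hS0, pv_join_nil] at hinv
        simp only [List.isEmpty_nil] at hinv
        simp only [Bool.false_eq_true, if_false]
        rw [hinv]
        rw [PySem.List.foldl_append_singleton_eq_map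
          (fun index => PySem.Str.join " " (PySem.List.slice data (some ((n : Int) - index)) (some (n : Int))))]
        simp
    | true =>
        have hl : (n : Int) < (data.length : Int) := by
          rcases hpre with h | h
          · omega
          · simpa using h
        have hS0e : pvS data (n : Int) ((n : Int) + 1) 0 =
            PySem.List.slice data (some (n : Int)) (some ((n : Int) + 1)) := by
          unfold pvS
          rw [show ((n : Int) - ((0 : Nat) : Int)) = (n : Int) by push_cast; ring]
        have hS0 : pvS data (n : Int) ((n : Int) + 1) 0 = [data[n]'(by exact_mod_cast hl)] := by
          rw [hS0e, pv_slice_cons data (n : Int) ((n : Int) + 1) (by positivity) (by omega) hl,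
            pv_slice_self data _ (by positivity)]
          simp
        have hinv := pv_loop_inv data (n : Int) ((n : Int) + 1) (by omega) (by omega) n le_rfl
        rw [hS0, pv_join_singleton] at hinv
        simp only [List.isEmpty_cons] at hinv
        simp only [if_true]
        rw [show PySem.List.pyGetD data ((n : Int)) "" = data[n]'(by exact_mod_cast hl) by
          rw [PySem.List.pyGetD_eq_getElem data "" (by positivity) hl]
          simp]
        rw [hinv]
        rw [PySem.List.foldl_append_singleton_eq_map
          (fun index => PySem.Str.join " " (PySem.List.slice data (some ((n : Int) - index)) (some ((n : Int) + 1))))]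
        simp
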